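-- pv_equiv track=rewrite | github.com/HappyDuckCoder/AIRushHour | code/SolverAlgorithms/Solver.py | compute_blocked_map
-- ===== SOURCE A (Python) =====
-- def compute_blocked_map(state, car_info):
--     # Compute which rows and columns have car
--     blocked_rows = [False] * 6
--     blocked_cols = [False] * 6
--     for name, x, y in state:
--         orient, length = car_info[name]
--         if orient == 'H':
--             blocked_rows[y] = True
--         else:
--             blocked_cols[x] = True
--     return blocked_rows, blocked_cols
-- ===== SOURCE B (Python) =====
-- def compute_blocked_map(state, car_info):
--     # Per-cell existence query: for each board index i, ask whether some car blocks it,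
--     # instead of mutating flag arrays in a single pass over the cars.
--     def row_blocked(i):
--         return any(car_info[name][0] == 'H' and y == i for name, x, y in state)
--
--     def col_blocked(i):
--         return any(car_info[name][0] != 'H' and x == i for name, x, y in state)
--
--     return [row_blocked(i) for i in range(6)], [col_blocked(i) for i in range(6)]
-- ===== Notes on version B (the rewrite author's own statement) =====
-- stated objective: alternative
-- what changed: Inverts the traversal: instead of one pass over the cars mutating two flag arrays in place, B loops over the six board indices and answers each entry by an existence query (any) over the state, so no mutable arrays are kept at all.
import Mathlib
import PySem

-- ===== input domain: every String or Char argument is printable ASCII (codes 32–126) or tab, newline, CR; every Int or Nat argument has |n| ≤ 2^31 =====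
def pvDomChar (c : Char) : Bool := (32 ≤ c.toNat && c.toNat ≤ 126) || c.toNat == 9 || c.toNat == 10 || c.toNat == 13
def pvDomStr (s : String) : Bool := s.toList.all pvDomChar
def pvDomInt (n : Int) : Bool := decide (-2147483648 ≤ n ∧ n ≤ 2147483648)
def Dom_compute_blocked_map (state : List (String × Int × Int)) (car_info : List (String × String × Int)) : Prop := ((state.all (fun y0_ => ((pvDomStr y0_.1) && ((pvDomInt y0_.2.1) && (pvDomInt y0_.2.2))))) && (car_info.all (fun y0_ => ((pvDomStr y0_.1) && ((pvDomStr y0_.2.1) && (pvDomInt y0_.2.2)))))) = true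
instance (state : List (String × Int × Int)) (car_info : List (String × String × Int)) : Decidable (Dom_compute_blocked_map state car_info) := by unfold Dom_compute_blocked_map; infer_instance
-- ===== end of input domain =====

-- B inverts the traversal: a per-board-index existence query over the state instead of A's single pass mutating two flag arrays (alternative; return-value equivalence on coords 0..5 with all names present).


-- ===== PORT A =====
-- blocked_rows[y] = True / blocked_cols[x] = True is pySetD (exact under Pre_, which puts the index in range);
-- car_info[name] is List.lookup (KeyError = none, excluded by Pre_).
def compute_blocked_map (state : List (String × Int × Int)) (car_info : List (String × String × Int)) : List Bool × List Bool :=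
  state.foldl (fun acc p =>
    match List.lookup p.1 car_info with
    | none => acc
    | some oi =>
      if oi.1 = "H" then (PySem.List.pySetD acc.1 p.2.2 true, acc.2)
      else (acc.1, PySem.List.pySetD acc.2 p.2.1 true))
    (List.replicate 6 false, List.replicate 6 false)

-- ===== PORT B =====
-- Source B's row_blocked(i): any(car_info[name][0] == 'H' and y == i for name, x, y in state)
def pvRowBlocked (state : List (String × Int × Int)) (car_info : List (String × String × Int)) (i : Int) : Bool :=
  state.any (fun p =>
    match List.lookup p.1 car_info with
    | none => false
    | some oi => oi.1 == "H" && p.2.2 == i)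

-- Source B's col_blocked(i): any(car_info[name][0] != 'H' and x == i for name, x, y in state)
def pvColBlocked (state : List (String × Int × Int)) (car_info : List (String × String × Int)) (i : Int) : Bool :=
  state.any (fun p =>
    match List.lookup p.1 car_info with
    | none => false
    | some oi => !(oi.1 == "H") && p.2.1 == i)

def compute_blocked_map_alt (state : List (String × Int × Int)) (car_info : List (String × String × Int)) : List Bool × List Bool :=
  ((PySem.List.pyRange 0 6 1).map (pvRowBlocked state car_info),
   (PySem.List.pyRange 0 6 1).map (pvColBlocked state car_info))

-- ===== PRECONDITION & SPEC =====
-- Pre_ excludes car names missing from car_info (A raises KeyError) and relevant coordinates outside 0..5,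
-- the board's natural domain: outside -6..5 A raises IndexError, and in -6..-1 A returns a value only through
-- Python's accidental negative-index wraparound, which B ignores (cited in claim.json).
def Pre_compute_blocked_map (state : List (String × Int × Int)) (car_info : List (String × String × Int)) : Prop :=
  state.all (fun p =>
    match List.lookup p.1 car_info with
    | none => false
    | some oi => if oi.1 = "H" then decide (0 ≤ p.2.2 ∧ p.2.2 < 6) else decide (0 ≤ p.2.1 ∧ p.2.1 < 6)) = true
instance (state : List (String × Int × Int)) (car_info : List (String × String × Int)) : Decidable (Pre_compute_blocked_map state car_info) := by unfold Pre_compute_blocked_map; infer_instance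

def pvWitness_compute_blocked_map : (List (String × Int × Int)) × (List (String × String × Int)) :=
  ([("A", 0, 2), ("B", 3, 1)], [("A", "H", 2), ("B", "V", 3)])

def Spec_compute_blocked_map (state : List (String × Int × Int)) (car_info : List (String × String × Int)) (out : List Bool × List Bool) : Prop := out = compute_blocked_map_alt state car_info
instance (state : List (String × Int × Int)) (car_info : List (String × String × Int)) (out : List Bool × List Bool) : Decidable (Spec_compute_blocked_map state car_info out) := by unfold Spec_compute_blocked_map; infer_instance

-- ===== CLAIM (what is proved, stated in full; the proofs are below) =====
def Claim_equal_compute_blocked_map : Prop := ∀ (state : List (String × Int × Int)) (car_info : List (String × String × Int)), Dom_compute_blocked_map state car_info → Pre_compute_blocked_map state car_info → Spec_compute_blocked_map state car_info (compute_blocked_map state car_info)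

-- ===== LEMMAS AND PROOFS =====

-- proof-only helpers: the row/column indices A marks
def pvHCands (state : List (String × Int × Int)) (car_info : List (String × String × Int)) : List Int :=
  state.filterMap (fun p =>
    match List.lookup p.1 car_info with
    | none => none
    | some oi => if oi.1 = "H" then some p.2.2 else none)

def pvVCands (state : List (String × Int × Int)) (car_info : List (String × String × Int)) : List Int :=
  state.filterMap (fun p =>
    match List.lookup p.1 car_info with
    | none => none
    | some oi => if oi.1 = "H" then none else some p.2.1)

-- A's single loop over the pair splits into two independent marking folds over the candidate lists.
lemma pv_fold_split (car_info : List (String × String × Int)) (state : List (String × Int × Int))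
    (rows cols : List Bool) :
    state.foldl (fun acc p =>
      match List.lookup p.1 car_info with
      | none => acc
      | some oi =>
        if oi.1 = "H" then (PySem.List.pySetD acc.1 p.2.2 true, acc.2)
        else (acc.1, PySem.List.pySetD acc.2 p.2.1 true)) (rows, cols)
    = ((pvHCands state car_info).foldl (fun r y => PySem.List.pySetD r y true) rows,
       (pvVCands state car_info).foldl (fun r x => PySem.List.pySetD r x true) cols) := by
  induction state generalizing rows cols with
  | nil => rfl
  | cons p t ih =>
    simp only [pvHCands, pvVCands, List.filterMap_cons, List.foldl_cons] at *
    cases h : List.lookup p.1 car_info with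
    | none => simp [ih]
    | some oi =>
      by_cases hH : oi.1 = "H" <;> simp [hH, ih]

-- marking fold, pointwise
lemma pv_mark_getElem? (l : List Int) (rows : List Bool)
    (hl : ∀ y ∈ l, 0 ≤ y ∧ y < (rows.length : Int)) (j : Nat) :
    (l.foldl (fun r y => PySem.List.pySetD r y true) rows)[j]? =
      rows[j]?.map (fun b => b || decide ((j : Int) ∈ l)) := by
  induction l generalizing rows with
  | nil =>
    simp
  | cons y t ih =>
    obtain ⟨hy0, hylt⟩ := hl y (by simp)
    have hset : PySem.List.pySetD rows y true = rows.set y.toNat true :=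
      PySem.List.pySetD_of_nonneg rows true hy0
    have hlen : (rows.set y.toNat true).length = rows.length := by simp
    have ht : ∀ z ∈ t, 0 ≤ z ∧ z < ((rows.set y.toNat true).length : Int) := by
      intro z hz; rw [hlen]; exact hl z (by simp [hz])
    rw [List.foldl_cons, hset, ih _ ht]
    rw [List.getElem?_set]
    have hyn : y.toNat < rows.length := by omega
    by_cases hjy : (j : Int) = y
    · have : y.toNat = j := by omega
      simp [this, List.getElem?_eq_getElem (this ▸ hyn), hjy]
      omega
    · have : ¬ (y.toNat = j) := by omega
      simp [this, hjy]

lemma pv_hcands_bound (state : List (String × Int × Int)) (car_info : List (String × String × Int))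
    (hpre : Pre_compute_blocked_map state car_info) :
    ∀ y ∈ pvHCands state car_info, 0 ≤ y ∧ y < 6 := by
  intro y hy
  simp only [pvHCands, List.mem_filterMap] at hy
  obtain ⟨p, hp, heq⟩ := hy
  unfold Pre_compute_blocked_map at hpre
  rw [List.all_eq_true] at hpre
  have := hpre p hp
  cases h : List.lookup p.1 car_info with
  | none => rw [h] at this; simp at this
  | some oi =>
    rw [h] at this heq
    by_cases hH : oi.1 = "H"
    · simp only [hH] at this heq
      simp at this
      cases heq; exact ⟨by exact_mod_cast this.1, by exact_mod_cast this.2⟩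
    · simp [hH] at heq

lemma pv_vcands_bound (state : List (String × Int × Int)) (car_info : List (String × String × Int))
    (hpre : Pre_compute_blocked_map state car_info) :
    ∀ x ∈ pvVCands state car_info, 0 ≤ x ∧ x < 6 := by
  intro x hx
  simp only [pvVCands, List.mem_filterMap] at hx
  obtain ⟨p, hp, heq⟩ := hx
  unfold Pre_compute_blocked_map at hpre
  rw [List.all_eq_true] at hpre
  have := hpre p hp
  cases h : List.lookup p.1 car_info with
  | none => rw [h] at this; simp at this
  | some oi =>
    rw [h] at this heq
    by_cases hH : oi.1 = "H"
    · simp [hH] at heq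
    · simp only [hH] at this heq
      simp at this
      cases heq; exact ⟨by exact_mod_cast this.1, by exact_mod_cast this.2⟩

-- B's existence query answers exactly "is i among A's marked candidates"
lemma pv_row_mem (state : List (String × Int × Int)) (car_info : List (String × String × Int)) (i : Int) :
    pvRowBlocked state car_info i = decide (i ∈ pvHCands state car_info) := by
  induction state with
  | nil => simp [pvRowBlocked, pvHCands]
  | cons p t ih =>
    cases h : List.lookup p.1 car_info with
    | none =>
      simp only [pvRowBlocked, pvHCands, List.any_cons, List.filterMap_cons, h] at *
      simpa using ih
    | some oi =>
      simp only [pvRowBlocked, pvHCands, List.any_cons, List.filterMap_cons, h] at *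
      by_cases hH : oi.1 = "H"
      · rw [if_pos hH]
        rcases eq_or_ne i p.2.2 with he | he
        · simp [hH, he]
        · have h1 : (p.2.2 == i) = false := beq_eq_false_iff_ne.mpr he.symm
          have h2 : (i == p.2.2) = false := beq_eq_false_iff_ne.mpr he
          simp [hH, h1, h2, ih]
      · rw [if_neg hH]
        have hb : (oi.1 == "H") = false := beq_eq_false_iff_ne.mpr hH
        simp [hb, ih]

lemma pv_col_mem (state : List (String × Int × Int)) (car_info : List (String × String × Int)) (i : Int) :
    pvColBlocked state car_info i = decide (i ∈ pvVCands state car_info) := by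
  induction state with
  | nil => simp [pvColBlocked, pvVCands]
  | cons p t ih =>
    cases h : List.lookup p.1 car_info with
    | none =>
      simp only [pvColBlocked, pvVCands, List.any_cons, List.filterMap_cons, h] at *
      simpa using ih
    | some oi =>
      simp only [pvColBlocked, pvVCands, List.any_cons, List.filterMap_cons, h] at *
      by_cases hH : oi.1 = "H"
      · rw [if_pos hH]
        simp [hH, ih]
      · rw [if_neg hH]
        rcases eq_or_ne i p.2.1 with he | he
        · simp [hH, he]
        · have h1 : (p.2.1 == i) = false := beq_eq_false_iff_ne.mpr he.symm
          have h2 : (i == p.2.1) = false := beq_eq_false_iff_ne.mpr he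
          simp [h1, h2, ih]

-- marking the candidates on an all-false length-6 array equals the membership map over 0..5
lemma pv_mark_eq_map (l : List Int) (hl : ∀ y ∈ l, 0 ≤ y ∧ y < 6) :
    l.foldl (fun r y => PySem.List.pySetD r y true) (List.replicate 6 false)
      = (PySem.List.pyRange 0 6 1).map (fun i => decide (i ∈ l)) := by
  apply List.ext_getElem?
  intro j
  have hl' : ∀ y ∈ l, 0 ≤ y ∧ y < ((List.replicate 6 false).length : Int) := by
    simpa using hl
  rw [pv_mark_getElem? l _ hl' j]
  rw [PySem.List.pyRange_one]
  by_cases hj : j < 6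
  · rw [List.getElem?_eq_getElem (by simpa using hj), List.getElem?_eq_getElem (by simpa using hj)]
    interval_cases j <;> simp
  · rw [List.getElem?_eq_none (by simpa using hj), List.getElem?_eq_none (by simp; omega)]
    rfl

-- ===== VERDICT (by name: the statement is the Claim_ definition above) =====
theorem compute_blocked_map_spec : Claim_equal_compute_blocked_map := by
  intro state car_info _hdom hpre
  unfold Spec_compute_blocked_map compute_blocked_map compute_blocked_map_alt
  rw [pv_fold_split]
  refine Prod.ext ?_ ?_
  · rw [pv_mark_eq_map _ (pv_hcands_bound state car_info hpre)]
    simp [pv_row_mem]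
  · rw [pv_mark_eq_map _ (pv_vcands_bound state car_info hpre)]
    simp [pv_col_mem]
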